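-- pv_equiv track=rewrite | github.com/jonasort/MEA_analysis | Structured/script_from_h5_to_graphml_for_electrogenomics.py | bin_isi
-- ===== SOURCE A (Python) =====
-- def bin_isi(isi_alone_dic, binsize, binmax=bool, binmaxnumber=None):
--     '''
--
--     Parameters
--     ----------
--     isi_alone_dic : dic
--         dictionary with all ISI for every channel
--     binsize: int
--         expects int in microseconds that defines bin-width
--     Returns
--     -------
--     histo_ISI_dic:
--         dic with key:channellabel, value: list with bincounts per bin
--
--     '''
--     isi_bins = []
--     isi_bins_list = []
--     isi_bin_count = []
--     histo_ISI_dic = {}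
--     for key in isi_alone_dic:
--         if binmax==True:
--             isi_bin_count=[]
--             isibins=create_bins(0, binsize, binmaxnumber)
--             isi_bins_list=[]
--             for i in range(0, len(isibins)):
--                 isi_bins=[]
--                 for a in isi_alone_dic[key]:
--                     if isibins[i][0] <= a < isibins[i][1]:
--                         isi_bins.append(a)
--                 isi_bins_list.append(isi_bins)
--             for i in range(0, (len(isi_bins_list)-1)):
--                 isi_bin_count.append(len(isi_bins_list[i]))
--             histo_ISI_dic[key]=isi_bin_count
--         #else:
--             # noch schreiben für variable maximalnummer an bins
--
--     return histo_ISI_dic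
--
-- def create_bins(lower_bound, width, quantity):
--     """ create_bins returns an equal-width (distance) partitioning.
--         It returns an ascending list of tuples, representing the intervals.
--         A tuple bins[i], i.e. (bins[i][0], bins[i][1])  with i > 0
--         and i < quantity, satisfies the following conditions:
--             (1) bins[i][0] + width == bins[i][1]
--             (2) bins[i-1][0] + width == bins[i][0] and
--                 bins[i-1][1] + width == bins[i][1]
--     """
--
--
--     bins = []
--     for low in range(lower_bound,
--                      lower_bound + quantity*width + 1, width):
--         bins.append((low, low+width))
--     return bins
-- ===== SOURCE B (Python) =====
-- def bin_isi(isi_alone_dic, binsize, binmax=bool, binmaxnumber=None):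
--     # Single-pass histogram per channel: one zero-filled count array, each ISI
--     # value placed by integer division, instead of A's per-bin rescans.
--     histo_ISI_dic = {}
--     for key, vals in isi_alone_dic.items():
--         if binmax == True:
--             nbins = len(range(0, binmaxnumber * binsize + 1, binsize))
--             counts = [0] * (nbins - 1)
--             if binsize > 0:
--                 for a in vals:
--                     idx = a // binsize
--                     if 0 <= idx < nbins - 1:
--                         counts[idx] += 1
--             histo_ISI_dic[key] = counts
--     return histo_ISI_dic
-- ===== Notes on version B (the rewrite author's own statement) =====
-- stated objective: alternative
-- what changed: A builds every bin interval and rescans the whole ISI list once per bin (then rescans the bin lists for their lengths); B zero-fills one count array per channel and places each ISI value directly by integer division in a single pass.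
import Mathlib
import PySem

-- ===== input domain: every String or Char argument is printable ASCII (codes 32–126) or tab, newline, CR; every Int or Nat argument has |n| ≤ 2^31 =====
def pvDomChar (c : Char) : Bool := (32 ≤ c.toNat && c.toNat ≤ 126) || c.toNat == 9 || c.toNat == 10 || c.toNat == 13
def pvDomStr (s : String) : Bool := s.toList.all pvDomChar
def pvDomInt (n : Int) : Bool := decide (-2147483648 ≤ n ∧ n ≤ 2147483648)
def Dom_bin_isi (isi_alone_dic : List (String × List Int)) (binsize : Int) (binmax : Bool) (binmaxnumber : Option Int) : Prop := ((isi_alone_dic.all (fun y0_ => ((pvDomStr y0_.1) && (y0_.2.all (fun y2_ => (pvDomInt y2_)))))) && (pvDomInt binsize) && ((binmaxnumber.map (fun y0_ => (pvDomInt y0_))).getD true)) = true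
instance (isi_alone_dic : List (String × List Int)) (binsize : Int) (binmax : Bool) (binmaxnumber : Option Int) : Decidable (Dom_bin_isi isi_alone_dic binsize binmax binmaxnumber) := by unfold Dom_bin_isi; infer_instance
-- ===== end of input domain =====

-- B replaces A's per-bin rescans of each channel by one zero-filled count
-- array per channel filled in a single pass via integer division.

-- ===== PORT A =====
-- create_bins(lower_bound, width, quantity)
def pvCreateBins (lower_bound : Int) (width : Int) (quantity : Int) : List (Int × Int) :=
  (PySem.List.pyRange lower_bound (lower_bound + quantity * width + 1) width).foldl
    (fun bins low => bins ++ [(low, low + width)]) []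

-- literal port of A; 'for key in isi_alone_dic' + 'isi_alone_dic[key]' is the
-- items iteration of the dict the assoc list denotes (PySem.Dict.ofList).
-- 'binmaxnumber.getD 0' is only reached under Pre_ with binmaxnumber = some q
-- (binmaxnumber = None makes Python raise TypeError in create_bins).
def bin_isi (isi_alone_dic : List (String × List Int)) (binsize : Int) (binmax : Bool) (binmaxnumber : Option Int) : List (String × List Int) :=
  ((PySem.Dict.ofList isi_alone_dic).items.foldl
    (fun (histo : PySem.Dict String (List Int)) (kv : String × List Int) =>
      if binmax == true then
        let isibins := pvCreateBins 0 binsize (binmaxnumber.getD 0)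
        let isi_bins_list :=
          (PySem.List.pyRange 0 (isibins.length : Int) 1).foldl
            (fun acc i =>
              let bin := PySem.List.pyGetD isibins i (0, 0)
              acc ++ [kv.2.foldl
                (fun bs a => if bin.1 ≤ a ∧ a < bin.2 then bs ++ [a] else bs) []])
            []
        let isi_bin_count :=
          (PySem.List.pyRange 0 ((isi_bins_list.length : Int) - 1) 1).foldl
            (fun acc i => acc ++ [((PySem.List.pyGetD isi_bins_list i []).length : Int)]) []
        histo.insert kv.1 isi_bin_count
      else histo)
    PySem.Dict.empty).items

-- ===== PORT B =====
-- literal port of Source B: one count array per channel, single pass, idx = a // binsize (alternative algorithm).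
def bin_isi_alt (isi_alone_dic : List (String × List Int)) (binsize : Int) (binmax : Bool) (binmaxnumber : Option Int) : List (String × List Int) :=
  ((PySem.Dict.ofList isi_alone_dic).items.foldl
    (fun (histo : PySem.Dict String (List Int)) (kv : String × List Int) =>
      if binmax == true then
        let nbins : Int :=
          ((PySem.List.pyRange 0 (binmaxnumber.getD 0 * binsize + 1) binsize).length : Int)
        let counts0 := PySem.List.pyRepeat [(0 : Int)] (nbins - 1)
        let counts :=
          if binsize > 0 then
            kv.2.foldl
              (fun cs a =>
                let idx := PySem.Int.floordiv a binsize
                if 0 ≤ idx ∧ idx < nbins - 1 then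
                  PySem.List.pySetD cs idx (PySem.List.pyGetD cs idx 0 + 1)
                else cs)
              counts0
          else counts0
        histo.insert kv.1 counts
      else histo)
    PySem.Dict.empty).items

-- ===== PRECONDITION & SPEC =====
-- Pre_ excludes exactly the inputs where Python A raises: when binmax is True and
-- the dict is nonempty, binsize = 0 (ValueError from range step 0) and
-- binmaxnumber = None (TypeError in create_bins) are excluded.
def Pre_bin_isi (isi_alone_dic : List (String × List Int)) (binsize : Int) (binmax : Bool) (binmaxnumber : Option Int) : Prop :=
  binmax = true → isi_alone_dic ≠ [] → (binsize ≠ 0 ∧ binmaxnumber ≠ none)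
instance (isi_alone_dic : List (String × List Int)) (binsize : Int) (binmax : Bool) (binmaxnumber : Option Int) : Decidable (Pre_bin_isi isi_alone_dic binsize binmax binmaxnumber) := by unfold Pre_bin_isi; infer_instance

def pvWitness_bin_isi : (List (String × List Int)) × Int × Bool × Option Int :=
  ([("a", [0, 5, 7])], 3, true, some 3)

def Spec_bin_isi (isi_alone_dic : List (String × List Int)) (binsize : Int) (binmax : Bool) (binmaxnumber : Option Int) (out : List (String × List Int)) : Prop := out = bin_isi_alt isi_alone_dic binsize binmax binmaxnumber
instance (isi_alone_dic : List (String × List Int)) (binsize : Int) (binmax : Bool) (binmaxnumber : Option Int) (out : List (String × List Int)) : Decidable (Spec_bin_isi isi_alone_dic binsize binmax binmaxnumber out) := by unfold Spec_bin_isi; infer_instance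

-- ===== CLAIM (what is proved, stated in full; the proofs are below) =====
def Claim_equal_bin_isi : Prop := ∀ (isi_alone_dic : List (String × List Int)) (binsize : Int) (binmax : Bool) (binmaxnumber : Option Int), Dom_bin_isi isi_alone_dic binsize binmax binmaxnumber → Pre_bin_isi isi_alone_dic binsize binmax binmaxnumber → Spec_bin_isi isi_alone_dic binsize binmax binmaxnumber (bin_isi isi_alone_dic binsize binmax binmaxnumber)

-- ===== LEMMAS AND PROOFS =====

-- j-th entry of B's single-pass histogram fold: initial value plus the number of
-- vals whose floor quotient by w is j (cs has exactly (N-1).toNat cells).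
lemma pvHistGet (w N : Int) (vals : List Int) : ∀ (cs : List Int),
    cs.length = (N - 1).toNat → ∀ (j : Nat),
    (vals.foldl
      (fun cs a =>
        let idx := PySem.Int.floordiv a w
        if 0 ≤ idx ∧ idx < N - 1 then
          PySem.List.pySetD cs idx (PySem.List.pyGetD cs idx 0 + 1)
        else cs)
      cs)[j]? =
    (cs[j]?).map (· + ((vals.countP (fun a => PySem.Int.floordiv a w == (j : Int))) : Int)) := by
  induction vals with
  | nil => intro cs hcs j; simp
  | cons a vals ih =>
    intro cs hcs j
    rw [List.foldl_cons]
    have hstep : (let idx := PySem.Int.floordiv a w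
        if 0 ≤ idx ∧ idx < N - 1 then
          PySem.List.pySetD cs idx (PySem.List.pyGetD cs idx 0 + 1)
        else cs) =
        if 0 ≤ PySem.Int.floordiv a w ∧ PySem.Int.floordiv a w < N - 1 then
          PySem.List.pySetD cs (PySem.Int.floordiv a w) (PySem.List.pyGetD cs (PySem.Int.floordiv a w) 0 + 1)
        else cs := rfl
    by_cases hg : 0 ≤ PySem.Int.floordiv a w ∧ PySem.Int.floordiv a w < N - 1
    · rw [hstep, if_pos hg]
      have hlen : (PySem.List.pySetD cs (PySem.Int.floordiv a w) (PySem.List.pyGetD cs (PySem.Int.floordiv a w) 0 + 1)).length = (N-1).toNat := by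
        rw [PySem.List.length_pySetD]; exact hcs
      rw [ih _ hlen j]
      rw [PySem.List.pySetD_of_nonneg _ _ hg.1, PySem.List.pyGetD_of_nonneg _ _ hg.1]
      by_cases hij : PySem.Int.floordiv a w = (j : Int)
      · have hjn : (PySem.Int.floordiv a w).toNat = j := by omega
        have hjlt : j < cs.length := by omega
        rw [hjn]
        rw [List.getElem?_set_self (by omega)]
        rw [List.getD_eq_getElem?_getD, List.getElem?_eq_getElem hjlt]
        simp [hij]
        omega
      · have hne : (PySem.Int.floordiv a w).toNat ≠ j := by omega
        rw [List.getElem?_set_ne hne]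
        simp [hij]
    · rw [hstep, if_neg hg]
      rw [ih _ hcs j]
      by_cases hij : PySem.Int.floordiv a w = (j : Int)
      · have hjge : cs.length ≤ j := by omega
        rw [List.getElem?_eq_none_iff.mpr hjge]
        simp
      · simp [hij]

-- per-channel equality: A's per-bin filter lengths = B's count array
lemma pvEntryEq (w q : Int) (hw : w ≠ 0) (vals : List Int) :
    (let isibins := pvCreateBins 0 w q
     let isi_bins_list :=
       (PySem.List.pyRange 0 (isibins.length : Int) 1).foldl
         (fun acc i =>
           let bin := PySem.List.pyGetD isibins i (0, 0)
           acc ++ [vals.foldl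
             (fun bs a => if bin.1 ≤ a ∧ a < bin.2 then bs ++ [a] else bs) []])
         []
     (PySem.List.pyRange 0 ((isi_bins_list.length : Int) - 1) 1).foldl
       (fun acc i => acc ++ [((PySem.List.pyGetD isi_bins_list i []).length : Int)]) []) =
    (let nbins : Int := ((PySem.List.pyRange 0 (q * w + 1) w).length : Int)
     let counts0 := PySem.List.pyRepeat [(0 : Int)] (nbins - 1)
     if w > 0 then
       vals.foldl
         (fun cs a =>
           let idx := PySem.Int.floordiv a w
           if 0 ≤ idx ∧ idx < nbins - 1 then
             PySem.List.pySetD cs idx (PySem.List.pyGetD cs idx 0 + 1)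
           else cs)
         counts0
     else counts0) := by
  simp only [pvCreateBins, PySem.List.foldl_append_singleton_eq_map,
    PySem.List.foldl_append_ite_eq_filter, List.nil_append, zero_add,
    List.length_map, PySem.List.length_pyRange_one, Int.sub_zero, Int.toNat_natCast]
  rw [PySem.List.pyRepeat_singleton]
  rcases lt_or_gt_of_ne hw with hneg | hpos
  · rw [if_neg (by omega)]
    refine Eq.trans (List.map_congr_left (g := fun (_ : Int) => (0:Int)) ?_) ?_
    · intro i hi
      rw [PySem.List.mem_pyRange_one] at hi
      rw [PySem.List.pyGetD_map_pyRange_of_nonneg _ _ _ _ hi.1 (by omega)]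
      have hfil : (List.filter
          (fun x_1 => decide
            ((PySem.List.pyGetD (List.map (fun x => (x, x + w)) (PySem.List.pyRange 0 (q * w + 1) w)) i (0, 0)).1 ≤ x_1 ∧
             x_1 < (PySem.List.pyGetD (List.map (fun x => (x, x + w)) (PySem.List.pyRange 0 (q * w + 1) w)) i (0, 0)).2))
          vals) = [] := by
        apply List.filter_eq_nil_iff.mpr
        intro a _
        rw [PySem.List.pyGetD_of_nonneg _ _ hi.1]
        rcases Nat.lt_or_ge i.toNat (List.map (fun x => (x, x + w)) (PySem.List.pyRange 0 (q * w + 1) w)).length with hlt | hge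
        · rw [List.getD_eq_getElem _ _ hlt]
          simp only [List.getElem_map]
          simp only [decide_eq_true_eq, not_and, not_lt]
          intro h1
          linarith
        · rw [List.getD_eq_default _ _ hge]
          simp only [decide_eq_true_eq, not_and, not_lt]
          intro h1
          linarith
      rw [hfil]
      exact (show ((List.length ([] : List Int) : Int) = (fun (_ : Int) => (0:Int)) i) by simp)
    · rw [List.map_const']
      simp [PySem.List.length_pyRange_one]
  · rw [if_pos hpos]
    have hchar := PySem.List.pyRange_of_pos 0 (q * w + 1) hpos
    simp only [Int.sub_zero] at hchar
    rw [hchar]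
    simp only [List.length_map, List.length_range, List.map_map]
    generalize (if (0:Int) < q * w + 1 then ((q * w + 1 + w - 1) / w).toNat else 0) = C
    apply List.ext_getElem?
    intro j
    rw [pvHistGet w (C : Int) vals _ (by simp) j]
    simp only [List.getElem?_map, PySem.List.getElem?_pyRange_one, List.getElem?_replicate,
      Int.sub_zero]
    by_cases h : j < ((C : Int) - 1).toNat
    · rw [if_pos h, if_pos h]
      simp only [Option.map_some, zero_add]
      congr 1
      rw [PySem.List.pyGetD_map_pyRange_of_nonneg _ _ _ _ (by positivity) (by omega)]
      rw [PySem.List.pyGetD_of_nonneg _ _ (by positivity : (0:Int) ≤ (j:Int))]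
      simp only [Int.toNat_natCast]
      have hjC : j < C := by omega
      simp only [PySem.List.getD_map_range _ _ _ _ hjC, Function.comp_apply]
      rw [List.countP_eq_length_filter]
      congr 1
      congr 1
      apply List.filter_congr
      intro a _
      rw [Bool.eq_iff_iff, decide_eq_true_eq, beq_iff_eq]
      rw [PySem.Int.floordiv_eq_iff_of_pos hpos]
      constructor
      · rintro ⟨h1, h2⟩
        constructor
        · nlinarith [mul_comm w (j : Int)]
        · nlinarith [mul_comm w (j : Int)]
      · rintro ⟨h1, h2⟩
        constructor
        · nlinarith [mul_comm w (j : Int)]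
        · nlinarith [mul_comm w (j : Int)]
    · rw [if_neg h, if_neg h]
      rfl

-- ===== VERDICT (by name: the statement is the Claim_ definition above) =====
theorem bin_isi_spec : Claim_equal_bin_isi := by
  intro l w bm bmn _hdom hpre
  unfold Spec_bin_isi bin_isi bin_isi_alt
  cases bm with
  | false => simp
  | true =>
    rcases l with _ | ⟨e, l'⟩
    · rfl
    · obtain ⟨hw, hq⟩ := hpre rfl (by simp)
      obtain ⟨q, rfl⟩ := Option.ne_none_iff_exists'.mp hq
      congr 2
      funext histo kv
      simp only [beq_self_eq_true, if_true, Option.getD_some]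
      exact congrArg (histo.insert kv.1) (pvEntryEq w q hw kv.2)
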